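-- pv_equiv track=rewrite | github.com/afni/afni | src/python_scripts/afni_python/afni_util.py | data_to_hex_str
-- ===== SOURCE A (Python) =====
-- def data_to_hex_str(data):
--    """convert raw data to hex string in groups of 4 bytes"""
--
--    if not data: return ''
--
--    dlen = len(data)             # total length in bytes
--    groups = (dlen+3) // 4       # number of 4-byte blocks to create
--    remain = dlen
--    retstr = ''  # return string
--
--    for group in range(groups):
--       if group > 0: retstr += ' '
--       retstr += '0x'
--       if remain >= 4: llen = 4
--       else:           llen = remain
--
--       for ind in range(llen):
--          retstr += '%02x' % data[dlen-remain+ind]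
--
--       remain -= llen
--
--    return retstr
-- ===== SOURCE B (Python) =====
-- def data_to_hex_str(data):
--    """convert raw data to hex string in groups of 4 bytes"""
--    hexes = ['%02x' % b for b in data]
--    return ' '.join('0x' + ''.join(hexes[i:i+4])
--                    for i in range(0, len(hexes), 4))
-- ===== Notes on version B (the rewrite author's own statement) =====
-- stated objective: simpler
-- what changed: Replaced the remain/llen ceiling-division bookkeeping and nested index arithmetic with a flat map of per-byte hex strings followed by slicing it into 4-element chunks and joining.
import Mathlib
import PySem

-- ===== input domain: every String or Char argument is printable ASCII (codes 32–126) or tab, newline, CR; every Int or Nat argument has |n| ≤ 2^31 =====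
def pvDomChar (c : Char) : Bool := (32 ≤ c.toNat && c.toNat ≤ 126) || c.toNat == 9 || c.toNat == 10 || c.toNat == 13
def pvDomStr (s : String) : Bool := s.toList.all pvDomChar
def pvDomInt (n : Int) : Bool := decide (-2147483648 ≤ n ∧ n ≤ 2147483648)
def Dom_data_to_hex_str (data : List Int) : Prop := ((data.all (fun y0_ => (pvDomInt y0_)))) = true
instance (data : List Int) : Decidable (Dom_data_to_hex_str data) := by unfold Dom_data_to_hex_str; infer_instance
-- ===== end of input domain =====

-- B replaces A's remain/llen bookkeeping and nested index arithmetic by a flat map of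
-- per-byte hex strings followed by chunking into slices of 4 and joining (objective: simpler).

-- ===== PORT A =====
-- '%02x' % n, exact: lowercase hex of |n|, '-' in front for negatives, zero-padded to width 2
-- (hand-written: PySem has no %-formatting primitive; Nat.toDigits 16 is lowercase hex with no leading zeros, as Python's).
def pvFmt02x (n : Int) : List Char :=
  if n < 0 then '-' :: Nat.toDigits 16 n.natAbs
  else
    let d := Nat.toDigits 16 n.toNat
    if d.length < 2 then List.replicate (2 - d.length) '0' ++ d else d

def data_to_hex_str (data : List Int) : String :=
  if data = [] then "" else
    let dlen : Int := (data.length : Int)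
    let groups := PySem.Int.floordiv (dlen + 3) 4
    let st := (PySem.List.pyRange 0 groups 1).foldl
      (fun (st : List Char × Int) group =>
        let retstr := if group > 0 then st.1 ++ [' '] else st.1
        let retstr := retstr ++ ['0', 'x']
        let llen : Int := if st.2 ≥ 4 then 4 else st.2
        let retstr := (PySem.List.pyRange 0 llen 1).foldl
          (fun r ind => r ++ pvFmt02x (PySem.List.pyGetD data (dlen - st.2 + ind) 0)) retstr
        (retstr, st.2 - llen)) ([], dlen)
    String.ofList st.1

-- ===== PORT B =====
def data_to_hex_str_alt (data : List Int) : String :=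
  let hexes := data.map pvFmt02x
  let groups := (PySem.List.pyRange 0 (hexes.length : Int) 4).map
    (fun i => ['0', 'x'] ++ (PySem.List.slice hexes (some i) (some (i + 4))).flatten)
  String.ofList (PySem.Chars.join [' '] groups)

-- ===== PRECONDITION & SPEC =====
def Spec_data_to_hex_str (data : List Int) (out : String) : Prop := out = data_to_hex_str_alt data
instance (data : List Int) (out : String) : Decidable (Spec_data_to_hex_str data out) := by unfold Spec_data_to_hex_str; infer_instance

-- ===== CLAIM (what is proved, stated in full; the proofs are below) =====
def Claim_equal_data_to_hex_str : Prop := ∀ (data : List Int), Dom_data_to_hex_str data → Spec_data_to_hex_str data (data_to_hex_str data)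

-- ===== LEMMAS AND PROOFS =====

/-- The groups both programs produce: "0x" ++ hex of the next ≤4 bytes, recursively. -/
def pvChunks : List Int → List (List Char)
  | [] => []
  | a :: t => (['0', 'x'] ++ ((a :: t).take 4).flatMap pvFmt02x) :: pvChunks ((a :: t).drop 4)
termination_by l => l.length
decreasing_by simp

theorem pvChunks_cons (a : Int) (t : List Int) :
    pvChunks (a :: t) = (['0', 'x'] ++ ((a :: t).take 4).flatMap pvFmt02x) :: pvChunks ((a :: t).drop 4) := by
  rw [pvChunks.eq_def]

theorem pvChunks_cons' (l : List Int) (h : l ≠ []) :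
    pvChunks l = (['0', 'x'] ++ (l.take 4).flatMap pvFmt02x) :: pvChunks (l.drop 4) := by
  match l with
  | a :: t => exact pvChunks_cons a t

theorem pv_join_space (c : List Char) (cs : List (List Char)) :
    PySem.Chars.join [' '] (c :: cs) = c ++ cs.flatMap (fun q => ' ' :: q) := by
  induction cs generalizing c with
  | nil => simp [PySem.Chars.join_singleton]
  | cons q rest ih => rw [PySem.Chars.join_cons_cons, ih]; simp

theorem pv_map_getD_range (data : List Int) (off cnt : Nat) (h : off + cnt ≤ data.length) :
    (List.range cnt).map (fun k => PySem.List.pyGetD data ((off : Int) + (k : Nat)) 0)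
      = (data.drop off).take cnt := by
  apply List.ext_getElem
  · simp; omega
  · intro k h1 h2
    have hk : k < cnt := by simpa using h1
    have hr : k < (List.range cnt).length := by simpa using hk
    have he : ((off : Int) + (((List.range cnt)[k]'hr) : Nat)) = ((off + k : Nat) : Int) := by
      simp [List.getElem_range]
    simp only [List.getElem_map, he, PySem.List.pyGetD_natCast]
    rw [List.getElem_take, List.getElem_drop]
    rw [List.getD_eq_getElem _ _ (by omega)]

theorem pv_inner (data : List Int) (off cnt : Nat) (h : off + cnt ≤ data.length) (r0 : List Char) :
    (PySem.List.pyRange 0 (cnt : Int) 1).foldl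
        (fun r ind => r ++ pvFmt02x (PySem.List.pyGetD data ((off : Int) + ind) 0)) r0
      = r0 ++ ((data.drop off).take cnt).flatMap pvFmt02x := by
  rw [PySem.List.foldl_append_eq_flatMap]
  congr 1
  rw [PySem.List.pyRange_one]
  simp only [Int.sub_zero, Int.toNat_natCast, List.flatMap_map, zero_add]
  rw [← pv_map_getD_range data off cnt h, List.flatMap_map]

theorem pv_A_rest (data : List Int) : ∀ (g : Nat) (off : Nat), off ≤ data.length →
    g = (data.length - off + 3) / 4 → ∀ (k : Int), 1 ≤ k → ∀ (r0 : List Char),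
    (PySem.List.pyRange k (k + (g : Int)) 1).foldl
      (fun (st : List Char × Int) group =>
        let retstr := if group > 0 then st.1 ++ [' '] else st.1
        let retstr := retstr ++ ['0', 'x']
        let llen : Int := if st.2 ≥ 4 then 4 else st.2
        let retstr := (PySem.List.pyRange 0 llen 1).foldl
          (fun r ind => r ++ pvFmt02x (PySem.List.pyGetD data ((data.length : Int) - st.2 + ind) 0)) retstr
        (retstr, st.2 - llen)) (r0, ((data.length : Int) - (off : Int)))
    = (r0 ++ (pvChunks (data.drop off)).flatMap (fun c => ' ' :: c), 0) := by
  intro g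
  induction g with
  | zero =>
    intro off hle hg k hk r0
    have hoff : off = data.length := by omega
    subst hoff
    rw [PySem.List.pyRange_one_eq_nil (by omega)]
    simp [List.drop_length, pvChunks]
  | succ g ih =>
    intro off hle hg k hk r0
    have hlt : off < data.length := by omega
    have hkpos : (0 : Int) < k := by omega
    rw [PySem.List.pyRange_one_cons (by push_cast; omega), List.foldl_cons]
    have hllen : (if ((data.length : Int) - (off : Int)) ≥ 4 then (4 : Int)
        else ((data.length : Int) - (off : Int))) = ((min 4 (data.length - off) : Nat) : Int) := by
      split_ifs with h4
      · push_cast; omega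
      · push_cast; omega
    have harith : ∀ ind : Int,
        (data.length : Int) - ((data.length : Int) - (off : Int)) + ind = (off : Int) + ind := by
      intro ind; ring
    simp only [hkpos, if_true, gt_iff_lt, hllen, harith]
    rw [pv_inner data off (min 4 (data.length - off)) (by omega)]
    have hsnd : ((data.length : Int) - (off : Int)) - ((min 4 (data.length - off) : Nat) : Int)
        = (data.length : Int) - ((off + min 4 (data.length - off) : Nat) : Int) := by
      push_cast; omega
    have hrange : k + ((g + 1 : Nat) : Int) = (k + 1) + (g : Int) := by push_cast; ring
    rw [hsnd, hrange, ih (off + min 4 (data.length - off)) (by omega) (by omega) (k + 1) (by omega)]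
    have hne : data.drop off ≠ [] := by
      intro hnil
      have := congrArg List.length hnil
      simp at this; omega
    rw [pvChunks_cons' (data.drop off) hne]
    have htake : (data.drop off).take (min 4 (data.length - off)) = (data.drop off).take 4 := by
      by_cases h4 : 4 ≤ data.length - off
      · rw [min_eq_left (by omega)]
      · rw [List.take_of_length_le (by simp; omega), List.take_of_length_le (by simp; omega)]
    have hdrop : (data.drop off).drop 4 = data.drop (off + min 4 (data.length - off)) := by
      by_cases h4 : 4 ≤ data.length - off
      · rw [List.drop_drop, min_eq_left (by omega)]
      · rw [List.drop_eq_nil_of_le (by simp; omega), eq_comm]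
        exact List.drop_eq_nil_of_le (by omega)
    rw [htake, hdrop, List.flatMap_cons]
    simp

theorem pv_pyRange4 (n : Nat) :
    PySem.List.pyRange 0 (n : Int) 4 = (List.range ((n + 3) / 4)).map (fun k => ((4 * k : Nat) : Int)) := by
  rw [PySem.List.pyRange_of_pos _ _ (by norm_num)]
  have hcnt : (if (0 : Int) < (n : Int) then (((n : Int) - 0 + 4 - 1) / 4).toNat else 0) = (n + 3) / 4 := by
    split_ifs with h
    · omega
    · omega
  rw [hcnt]
  apply List.map_congr_left
  intro k _
  push_cast
  ring

theorem pv_slice4 (xs : List (List Char)) (j : Nat) :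
    PySem.List.slice xs (some ((4 * j : Nat) : Int)) (some (((4 * j : Nat) : Int) + 4)) = (xs.drop (4 * j)).take 4 := by
  have h4 : ((4 * j : Nat) : Int) + 4 = ((4 * j : Nat) : Int) + ((4 : Nat) : Int) := by norm_num
  rw [h4, PySem.List.slice_natCast_add]

theorem pv_B_core : ∀ (N : Nat) (l : List Int), l.length ≤ N →
    (List.range ((l.length + 3) / 4)).map
      (fun k => ['0', 'x'] ++ (PySem.List.slice (l.map pvFmt02x)
        (some ((4 * k : Nat) : Int)) (some (((4 * k : Nat) : Int) + 4))).flatten)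
    = pvChunks l := by
  intro N
  induction N with
  | zero =>
    intro l hl
    have : l = [] := by
      cases l with
      | nil => rfl
      | cons a t => simp at hl
    subst this
    simp [pvChunks]
  | succ N ih =>
    intro l hl
    match l with
    | [] => simp [pvChunks]
    | a :: t =>
      have hm : ((a :: t).length + 3) / 4 = (((a :: t).drop 4).length + 3) / 4 + 1 := by
        simp; omega
      rw [hm, List.range_succ_eq_map, List.map_cons, List.map_map]
      rw [pvChunks_cons a t]
      congr 1
      · -- head group
        rw [pv_slice4]
        simp [List.flatMap_def, List.map_take]
      · -- tail groups
        have hbody : ∀ k : Nat,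
            (((a :: t).map pvFmt02x).drop (4 * Nat.succ k)).take 4
              = ((((a :: t).drop 4).map pvFmt02x).drop (4 * k)).take 4 := by
          intro k
          rw [List.map_drop, List.drop_drop]
          congr 2
          omega
        calc (List.range ((((a :: t).drop 4).length + 3) / 4)).map
              ((fun k => ['0', 'x'] ++ (PySem.List.slice ((a :: t).map pvFmt02x)
                (some ((4 * k : Nat) : Int)) (some (((4 * k : Nat) : Int) + 4))).flatten) ∘ Nat.succ)
            = (List.range ((((a :: t).drop 4).length + 3) / 4)).map
              (fun k => ['0', 'x'] ++ (PySem.List.slice (((a :: t).drop 4).map pvFmt02x)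
                (some ((4 * k : Nat) : Int)) (some (((4 * k : Nat) : Int) + 4))).flatten) := by
              apply List.map_congr_left
              intro k _
              simp only [Function.comp_apply, pv_slice4, hbody]
          _ = pvChunks ((a :: t).drop 4) := by
              apply ih
              simp at hl ⊢
              omega

-- ===== VERDICT (by name: the statement is the Claim_ definition above) =====
theorem data_to_hex_str_spec : Claim_equal_data_to_hex_str := by
  unfold Claim_equal_data_to_hex_str
  intro data _
  unfold Spec_data_to_hex_str
  by_cases hnil : data = []
  · subst hnil
    decide
  · have hlen1 : 0 < data.length := List.length_pos_iff.mpr hnil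
    -- A side
    have hG : PySem.Int.floordiv ((data.length : Int) + 3) 4 = (((data.length + 3) / 4 : Nat) : Int) := by
      have h1 : ((data.length : Int) + 3) = (((data.length + 3 : Nat)) : Int) := by push_cast; ring
      rw [h1]
      exact_mod_cast PySem.Int.floordiv_natCast (data.length + 3) 4
    have hGpos : (0 : Int) < (((data.length + 3) / 4 : Nat) : Int) := by
      have : 0 < (data.length + 3) / 4 := by omega
      exact_mod_cast this
    simp only [data_to_hex_str, if_neg hnil, hG]
    rw [PySem.List.pyRange_one_cons hGpos, List.foldl_cons]
    have hzero : ¬ ((0 : Int) > 0) := by norm_num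
    have hllen0 : (if ((data.length : Int)) ≥ 4 then (4 : Int) else (data.length : Int))
        = ((min 4 data.length : Nat) : Int) := by
      split_ifs with h4
      · push_cast; omega
      · push_cast; omega
    have harith0 : ∀ ind : Int,
        (data.length : Int) - (data.length : Int) + ind = (((0 : Nat)) : Int) + ind := by
      intro ind; push_cast; ring
    simp only [hzero, if_false, gt_iff_lt, hllen0, harith0]
    rw [pv_inner data 0 (min 4 data.length) (by omega)]
    have hrange1 : (0 : Int) + 1 = 1 := by norm_num
    have hrangeG : (((data.length + 3) / 4 : Nat) : Int) = 1 + (((data.length + 3) / 4 - 1 : Nat) : Int) := by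
      push_cast [Nat.cast_sub (by omega : 1 ≤ (data.length + 3) / 4)]
      ring
    rw [hrange1, hrangeG,
      pv_A_rest data ((data.length + 3) / 4 - 1) (min 4 data.length) (by omega) (by omega) 1 (by norm_num)]
    -- B side
    simp only [data_to_hex_str_alt, List.length_map]
    rw [pv_pyRange4 data.length, List.map_map]
    have hcomp :
        (List.range ((data.length + 3) / 4)).map
          ((fun i => ['0', 'x'] ++ (PySem.List.slice (data.map pvFmt02x) (some i) (some (i + 4))).flatten)
            ∘ (fun k => ((4 * k : Nat) : Int)))
          = (List.range ((data.length + 3) / 4)).map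
          (fun k => ['0', 'x'] ++ (PySem.List.slice (data.map pvFmt02x)
            (some ((4 * k : Nat) : Int)) (some (((4 * k : Nat) : Int) + 4))).flatten) := by
      apply List.map_congr_left
      intro k _
      simp only [Function.comp_apply]
    rw [hcomp, pv_B_core data.length data le_rfl, pvChunks_cons' data hnil, pv_join_space]
    -- both sides are now explicit lists
    congr 1
    have htake : (data.drop 0).take (min 4 data.length) = data.take 4 := by
      by_cases h4 : 4 ≤ data.length
      · rw [List.drop_zero, min_eq_left (by omega)]
      · rw [List.drop_zero, List.take_of_length_le (by omega), List.take_of_length_le (by omega)]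
    have hdrop : pvChunks (data.drop (min 4 data.length)) = pvChunks (data.drop 4) := by
      by_cases h4 : 4 ≤ data.length
      · rw [min_eq_left (by omega)]
      · rw [List.drop_eq_nil_of_le (by omega), List.drop_eq_nil_of_le (by omega)]
    rw [htake, hdrop]
    simp
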